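-- pv_equiv track=rewrite | github.com/JNK234/Self-evolving-agent | src/agents/math_solver/tools/generated/structure_problem_components.py | structure_problem_components_impl
-- ===== SOURCE A (Python) =====
-- from typing import Dict, List
--
-- def structure_problem_components_impl(problem_text: str, component_prefixes: Dict[str, str]) -> Dict[str, List[str]]:
--     '''
--     Parses a semi-structured text block into a dictionary of categorized statements.
--
--     Takes a multi-line string where each line is potentially prefixed with a label
--     (e.g., 'Fact:', 'Goal:'). It uses a provided map of prefixes to categorize each
--     line, returning a dictionary where keys are the categories and values are lists
--     of the corresponding statements. This tool is useful for converting an agent's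
--     preliminary problem breakdown into a structured, machine-readable format for
--     further processing.
--
--     Args:
--         problem_text (str): The multi-line string containing the deconstructed problem
--                             components, with each component on a new line.
--         component_prefixes (Dict[str, str]): A dictionary mapping category names
--                                              (e.g., 'facts') to the string prefixes
--                                              used to identify them in the text
--                                              (e.g., 'Fact:'). The keys become the
--                                              keys in the output dictionary.
--
--     Returns:
--         Dict[str, List[str]]: A dictionary where keys are the categories from
--                               `component_prefixes` (plus an 'unclassified' key for
--                               non-matching lines) and values are lists of the
--                               extracted text statements for each category.
--     '''
--     # 1. Initialize a result dictionary `structured_components`.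
--     # 2. For each `category_name` in the keys of the input `component_prefixes`, add it to `structured_components` with an empty list as its value.
--     structured_components: Dict[str, List[str]] = {category_name: [] for category_name in component_prefixes.keys()}
--
--     # 3. Add an 'unclassified' key to `structured_components` with an empty list.
--     structured_components['unclassified'] = []
--
--     # 4. Create a list of `(category_name, prefix)` tuples from `component_prefixes`.
--     prefixes_list = list(component_prefixes.items())
--
--     # 5. Sort this list in descending order based on the length of the `prefix` string.
--     sorted_prefixes = sorted(prefixes_list, key=lambda item: len(item[1]), reverse=True)
--
--     # 6. Split the input `problem_text` into a list of individual lines.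
--     lines = problem_text.splitlines()
--
--     # 7. For each `line` in the list:
--     for line in lines:
--         # a. Strip leading/trailing whitespace from the `line`. If the result is empty, skip to the next line.
--         stripped_line = line.strip()
--         if not stripped_line:
--             continue
--
--         # b. Set a `matched` flag to `False`.
--         matched = False
--
--         # c. Iterate through the sorted list of prefixes:
--         for category_name, prefix in sorted_prefixes:
--             # i. If the line starts with the current `prefix`:
--             if stripped_line.startswith(prefix):
--                 # - Extract the statement by slicing the string after the prefix, then strip whitespace.
--                 statement = stripped_line[len(prefix):].strip()
--                 # - Append the extracted statement to the list associated with the corresponding `category_name` in `structured_components`.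
--                 structured_components[category_name].append(statement)
--                 # - Set `matched` to `True` and break the inner loop.
--                 matched = True
--                 break
--
--         # d. If after checking all prefixes the `matched` flag is still `False`, append the original stripped line to the 'unclassified' list in `structured_components`.
--         if not matched:
--             structured_components['unclassified'].append(stripped_line)
--
--     # 8. Return the `structured_components` dictionary.
--     return structured_components
-- ===== SOURCE B (Python) =====
-- from typing import Dict, List
--
-- def structure_problem_components_impl(problem_text: str, component_prefixes: Dict[str, str]) -> Dict[str, List[str]]:
--     """Classify-then-group: tag each non-empty stripped line with its category
--     (longest matching prefix, first-seen wins ties) in one unsorted scan, then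
--     build the result dict by grouping the tagged statements per category."""
--     items = list(component_prefixes.items())
--
--     def classify(s):
--         best = None
--         for name, p in items:
--             if s.startswith(p) and (best is None or len(p) > len(best[1])):
--                 best = (name, p)
--         if best is None:
--             return ('unclassified', s)
--         return (best[0], s[len(best[1]):].strip())
--
--     tagged = [classify(s) for s in map(str.strip, problem_text.splitlines()) if s]
--     keys = list(component_prefixes)
--     if 'unclassified' not in component_prefixes:
--         keys.append('unclassified')
--     return {k: [st for key, st in tagged if key == k] for k in keys}
-- ===== Notes on version B (the rewrite author's own statement) =====
-- stated objective: alternative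
-- what changed: B replaces A's sort-prefixes-then-fold-lines-into-a-mutated-dict by a two-stage classify-then-group pipeline: one unsorted longest-prefix scan tags every line with its category, and the output dict is then built per key by filtering the tagged list (no sort, no in-place dict mutation).
import Mathlib
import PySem

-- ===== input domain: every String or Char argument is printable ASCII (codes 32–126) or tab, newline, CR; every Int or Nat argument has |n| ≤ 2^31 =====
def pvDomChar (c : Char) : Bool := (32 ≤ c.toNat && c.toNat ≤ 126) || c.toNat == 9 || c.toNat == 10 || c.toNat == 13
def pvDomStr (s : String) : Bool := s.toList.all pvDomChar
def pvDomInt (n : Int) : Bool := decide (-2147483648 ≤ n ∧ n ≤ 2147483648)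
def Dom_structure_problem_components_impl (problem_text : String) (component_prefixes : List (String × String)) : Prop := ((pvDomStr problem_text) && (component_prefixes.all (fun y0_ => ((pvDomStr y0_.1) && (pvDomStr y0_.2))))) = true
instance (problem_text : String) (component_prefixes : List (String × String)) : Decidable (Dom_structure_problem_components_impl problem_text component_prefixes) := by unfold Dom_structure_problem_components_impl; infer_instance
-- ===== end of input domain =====

-- B replaces A's sort-then-fold-into-a-mutated-dict by a two-stage pipeline: tag every
-- non-empty stripped line with its category (longest matching prefix, first-seen wins
-- ties, no sort), then build the output per key by filtering the tagged list.

-- ===== PORT A =====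
def structure_problem_components_impl (problem_text : String) (component_prefixes : List (String × String)) : List (String × List String) :=
  let cp := PySem.Dict.ofList component_prefixes
  let d0 := cp.keys.foldl (fun d k => d.insert k ([] : List String)) PySem.Dict.empty
  let d1 := d0.insert "unclassified" []
  let sortedPrefixes := PySem.List.sorted cp.items (fun item => PySem.Str.len item.2) true
  let final := (PySem.Str.splitlines problem_text).foldl (fun d line =>
    let s := PySem.Str.strip line
    if s = "" then d
    else
      match sortedPrefixes.find? (fun cpp => PySem.Str.startswith s cpp.2) with
      | some (c, p) => d.modify c [] (· ++ [PySem.Str.strip (PySem.Str.slice s (some (PySem.Str.len p)) none)])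
      | none => d.modify "unclassified" [] (· ++ [s])) d1
  final.items

-- ===== PORT B =====
-- helper classify(s): unsorted scan keeping the longest matching prefix (first-seen wins ties)
def pvClassifyLine (cpItems : List (String × String)) (s : String) : String × String :=
  match cpItems.foldl (fun b cpp =>
      if PySem.Str.startswith s cpp.2 &&
         b.elim true (fun bb => decide (PySem.Str.len bb.2 < PySem.Str.len cpp.2))
      then some cpp else b) (none : Option (String × String)) with
  | none => ("unclassified", s)
  | some (c, p) => (c, PySem.Str.strip (PySem.Str.slice s (some (PySem.Str.len p)) none))

def structure_problem_components_impl_alt (problem_text : String) (component_prefixes : List (String × String)) : List (String × List String) :=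
  let cp := PySem.Dict.ofList component_prefixes
  let tagged := (PySem.Str.splitlines problem_text).filterMap (fun line =>
    let s := PySem.Str.strip line
    if s = "" then none else some (pvClassifyLine cp.items s))
  let ks := cp.keys ++ (if cp.contains "unclassified" then [] else ["unclassified"])
  ks.map (fun k => (k, tagged.filterMap (fun p => if p.1 == k then some p.2 else none)))

-- ===== PRECONDITION & SPEC =====
def Spec_structure_problem_components_impl (problem_text : String) (component_prefixes : List (String × String)) (out : List (String × List String)) : Prop := out = structure_problem_components_impl_alt problem_text component_prefixes
instance (problem_text : String) (component_prefixes : List (String × String)) (out : List (String × List String)) : Decidable (Spec_structure_problem_components_impl problem_text component_prefixes out) := by unfold Spec_structure_problem_components_impl; infer_instance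

-- ===== CLAIM (what is proved, stated in full; the proofs are below) =====
def Claim_equal_structure_problem_components_impl : Prop := ∀ (problem_text : String) (component_prefixes : List (String × String)), Dom_structure_problem_components_impl problem_text component_prefixes → Spec_structure_problem_components_impl problem_text component_prefixes (structure_problem_components_impl problem_text component_prefixes)

-- ===== LEMMAS AND PROOFS =====

-- B's per-line scan step, abstracted: P = "line starts with the prefix", key = prefix length.
def pvBest {α : Type} (P : α → Bool) (key : α → Int) (b : Option α) (x : α) : Option α :=
  if P x && b.elim true (fun bb => decide (key bb < key x)) then some x else b

theorem pvBest_swap {α : Type} (P : α → Bool) (key : α → Int) (b : Option α) (x y : α)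
    (h : key y < key x) : pvBest P key (pvBest P key b x) y = pvBest P key (pvBest P key b y) x := by
  rcases b with _ | bb <;> rcases hx : P x <;> rcases hy : P y <;>
    simp only [pvBest, hx, hy, Bool.true_and, Bool.false_and,
      Option.elim_none, Option.elim_some, decide_eq_true_eq] <;>
    split_ifs <;> simp_all <;> omega

theorem pvBest_foldl_lt {α : Type} (P : α → Bool) (key : α → Int) (x : α) (ys : List α)
    (h : ∀ y ∈ ys, key y < key x) (b : Option α) :
    ys.foldl (pvBest P key) (pvBest P key b x) = pvBest P key (ys.foldl (pvBest P key) b) x := by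
  induction ys generalizing b with
  | nil => rfl
  | cons y t ih =>
      simp only [List.foldl_cons]
      rw [pvBest_swap P key b x y (h y (by simp)), ih (fun z hz => h z (by simp [hz]))]

theorem pvBest_foldl_le {α : Type} (P : α → Bool) (key : α → Int) (a : α) (t : List α)
    (h : ∀ y ∈ t, key y ≤ key a) :
    t.foldl (pvBest P key) (some a) = some a := by
  induction t with
  | nil => rfl
  | cons y t ih =>
      have hy : key y ≤ key a := h y (by simp)
      have hstep : pvBest P key (some a) y = some a := by
        simp only [pvBest, Option.elim]
        split_ifs with hc
        · simp at hc; omega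
        · rfl
      rw [List.foldl_cons, hstep, ih (fun z hz => h z (by simp [hz]))]

-- a scan over a key-descending list returns its first match
theorem pvBest_foldl_sorted {α : Type} (P : α → Bool) (key : α → Int) (acc : List α)
    (hs : acc.Pairwise (fun a b => key b ≤ key a)) :
    acc.foldl (pvBest P key) none = acc.find? P := by
  induction acc with
  | nil => rfl
  | cons a t ih =>
      rcases List.pairwise_cons.mp hs with ⟨hhead, htail⟩
      rcases hPa : P a with _ | _
      · have hstep : pvBest P key none a = none := by simp [pvBest, hPa]
        rw [List.foldl_cons, hstep, ih htail, List.find?_cons_of_neg (by simp [hPa])]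
      · have hstep : pvBest P key none a = some a := by simp [pvBest, hPa]
        rw [List.foldl_cons, hstep, pvBest_foldl_le P key a t hhead,
          List.find?_cons_of_pos hPa]

theorem pvInsertBy_pairwise {α : Type} (key : α → Int) (x : α) (ys : List α)
    (hs : ys.Pairwise (fun a b => key b ≤ key a)) :
    (PySem.List.insertBy (fun a b => decide (key b < key a)) x ys).Pairwise
      (fun a b => key b ≤ key a) := by
  induction ys with
  | nil => simp [PySem.List.insertBy]
  | cons y t ih =>
      rcases List.pairwise_cons.mp hs with ⟨hhead, htail⟩
      simp only [PySem.List.insertBy]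
      split_ifs with hc
      · simp only [decide_eq_true_eq] at hc
        refine List.pairwise_cons.mpr ⟨?_, hs⟩
        intro z hz
        rcases List.mem_cons.mp hz with rfl | hz
        · exact le_of_lt hc
        · exact le_trans (hhead z hz) (le_of_lt hc)
      · simp only [decide_eq_true_eq, not_lt] at hc
        refine List.pairwise_cons.mpr ⟨?_, ih htail⟩
        intro z hz
        rcases (PySem.List.mem_insertBy _ x z t).mp hz with rfl | hz
        · exact hc
        · exact hhead z hz

theorem pvBest_foldl_insertBy {α : Type} (P : α → Bool) (key : α → Int) (x : α) (acc : List α)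
    (hs : acc.Pairwise (fun a b => key b ≤ key a)) (b : Option α) :
    (PySem.List.insertBy (fun a b => decide (key b < key a)) x acc).foldl (pvBest P key) b
      = pvBest P key (acc.foldl (pvBest P key) b) x := by
  induction acc generalizing b with
  | nil => rfl
  | cons a t ih =>
      rcases List.pairwise_cons.mp hs with ⟨hhead, htail⟩
      simp only [PySem.List.insertBy]
      split_ifs with hc
      · simp only [decide_eq_true_eq] at hc
        simp only [List.foldl_cons]
        rw [pvBest_swap P key b x a hc]
        exact pvBest_foldl_lt P key x t (fun y hy => lt_of_le_of_lt (hhead y hy) hc) _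
      · simp only [List.foldl_cons]
        exact ih htail _

theorem pvFind_sorted_eq_foldl {α : Type} (P : α → Bool) (key : α → Int) (l acc : List α)
    (hs : acc.Pairwise (fun a b => key b ≤ key a)) :
    (l.foldl (fun a x => PySem.List.insertBy (fun a b => decide (key b < key a)) x a) acc).find? P
      = l.foldl (pvBest P key) (acc.foldl (pvBest P key) none) := by
  induction l generalizing acc with
  | nil =>
      simp only [List.foldl_nil]
      exact (pvBest_foldl_sorted P key acc hs).symm
  | cons x l ih =>
      simp only [List.foldl_cons]
      rw [ih _ (pvInsertBy_pairwise key x acc hs),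
        pvBest_foldl_insertBy P key x acc hs]

-- A's first match on the length-descending sorted list = B's unsorted best-tracking scan
theorem pvSelector_eq (s : String) (l : List (String × String)) :
    (PySem.List.sorted l (fun item => PySem.Str.len item.2) true).find?
        (fun cpp => PySem.Str.startswith s cpp.2)
      = l.foldl (fun b cpp =>
          if PySem.Str.startswith s cpp.2 &&
             b.elim true (fun bb => decide (PySem.Str.len bb.2 < PySem.Str.len cpp.2))
          then some cpp else b) (none : Option (String × String)) := by
  rw [PySem.List.sorted_rev_eq_foldl_insertBy]
  have h := pvFind_sorted_eq_foldl (fun cpp => PySem.Str.startswith s cpp.2)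
    (fun item => PySem.Str.len item.2) l [] List.Pairwise.nil
  simpa only [pvBest, List.foldl_nil] using h

-- the dict-mutating line loop of A equals the fold of the tagged pairs produced by B's classify
theorem pvScan_mem {α : Type} (c : Option α → α → Bool) (l : List α) :
    ∀ (b : Option α) (y : α),
      l.foldl (fun b x => if c b x then some x else b) b = some y → y ∈ l ∨ b = some y := by
  induction l with
  | nil => intro b y h; exact Or.inr h
  | cons a t ih =>
      intro b y h
      simp only [List.foldl_cons] at h
      rcases ih _ y h with hy | hy
      · exact Or.inl (List.mem_cons.mpr (Or.inr hy))
      · by_cases hc : c b a = true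
        · rw [if_pos hc] at hy
          exact Or.inl (List.mem_cons.mpr (Or.inl (Option.some.inj hy).symm))
        · rw [if_neg hc] at hy
          exact Or.inr hy

theorem pvClassify_key_mem (cpItems : List (String × String)) (s : String) :
    (pvClassifyLine cpItems s).1 = "unclassified" ∨ (pvClassifyLine cpItems s).1 ∈ cpItems.map Prod.fst := by
  rcases hres : cpItems.foldl (fun b cpp =>
      if PySem.Str.startswith s cpp.2 &&
         b.elim true (fun bb => decide (PySem.Str.len bb.2 < PySem.Str.len cpp.2))
      then some cpp else b) (none : Option (String × String)) with _ | ⟨c, p⟩ <;>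
    simp only [pvClassifyLine, hres]
  · exact Or.inl trivial
  · rcases pvScan_mem _ cpItems none (c, p) hres with hm | hb
    · exact Or.inr (List.mem_map.mpr ⟨(c, p), hm, rfl⟩)
    · cases hb

theorem pvFilterMap_eq_filter_map {α β : Type} [BEq α] (l : List (α × β)) (k : α) :
    l.filterMap (fun p => if p.1 == k then some p.2 else none)
      = (l.filter (fun p => p.1 == k)).map Prod.snd := by
  induction l with
  | nil => rfl
  | cons a t ih =>
      by_cases h : (a.1 == k) = true <;>
        simp only [List.filterMap_cons, List.filter_cons, h, ite_true, ite_false,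
          Bool.false_eq_true, List.map_cons, ih]

theorem pvLines_fold (cpItems : List (String × String)) (lines : List String) :
    ∀ d : PySem.Dict String (List String),
    lines.foldl (fun d line =>
      if PySem.Str.strip line = "" then d
      else
        match (PySem.List.sorted cpItems (fun item => PySem.Str.len item.2) true).find?
            (fun cpp => PySem.Str.startswith (PySem.Str.strip line) cpp.2) with
        | some (c, p) => d.modify c [] (· ++ [PySem.Str.strip (PySem.Str.slice (PySem.Str.strip line) (some (PySem.Str.len p)) none)])
        | none => d.modify "unclassified" [] (· ++ [PySem.Str.strip line])) d
    = (lines.filterMap (fun line =>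
        if PySem.Str.strip line = "" then none
        else some (pvClassifyLine cpItems (PySem.Str.strip line)))).foldl
        (fun d p => d.modify p.1 [] (· ++ [p.2])) d := by
  induction lines with
  | nil => intro d; rfl
  | cons ln t ih =>
      intro d
      simp only [List.foldl_cons, List.filterMap_cons]
      by_cases hs : PySem.Str.strip ln = ""
      · simp only [if_pos hs]
        exact ih d
      · simp only [if_neg hs]
        rw [pvSelector_eq]
        rcases hres : (cpItems.foldl (fun b cpp =>
            if PySem.Str.startswith (PySem.Str.strip ln) cpp.2 &&
               b.elim true (fun bb => decide (PySem.Str.len bb.2 < PySem.Str.len cpp.2))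
            then some cpp else b) (none : Option (String × String))) with _ | ⟨c, p⟩ <;>
          simp only [hres, pvClassifyLine, List.foldl_cons] <;>
          exact ih _

theorem pvGetD_foldl_insert_nil (ks : List String) :
    ∀ (d : PySem.Dict String (List String)), (∀ k', d.getD k' [] = []) →
      ∀ k', (ks.foldl (fun d k => d.insert k ([] : List String)) d).getD k' [] = [] := by
  induction ks with
  | nil => intro d h k'; exact h k'
  | cons a t ih =>
      intro d h k'
      simp only [List.foldl_cons]
      refine ih _ (fun j => ?_) k'
      rw [PySem.Dict.getD_insert]
      split_ifs with hj
      · rfl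
      · exact h j

theorem pvFold_items (cp : PySem.Dict String String) (tg : List (String × String))
    (hnd : cp.keys.Nodup)
    (hmem : ∀ p ∈ tg, p.1 = "unclassified" ∨ p.1 ∈ cp.keys) :
    (tg.foldl (fun d p => d.modify p.1 [] (· ++ [p.2]))
        ((cp.keys.foldl (fun d k => d.insert k ([] : List String)) PySem.Dict.empty).insert "unclassified" [])).items
      = (cp.keys ++ (if cp.contains "unclassified" then [] else ["unclassified"])).map
          (fun k => (k, tg.filterMap (fun p => if p.1 == k then some p.2 else none))) := by
  set d0 : PySem.Dict String (List String) :=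
    cp.keys.foldl (fun d k => d.insert k ([] : List String)) PySem.Dict.empty with hd0
  set d1 : PySem.Dict String (List String) := d0.insert "unclassified" [] with hd1
  set F : PySem.Dict String (List String) :=
    tg.foldl (fun d p => d.modify p.1 [] (· ++ [p.2])) d1 with hF
  have hk0 : d0.keys = cp.keys := by
    rw [hd0]
    have h := PySem.Dict.keys_foldl_insert cp.keys
      (fun _ _ => ([] : List String)) (PySem.Dict.empty (κ := String) (ν := List String))
    simp only [] at h
    rw [h]
    have he : (PySem.Dict.empty (κ := String) (ν := List String)).keys = [] := rfl
    rw [he, PySem.Set.update_nil_left, PySem.Set.ofList_eq_self_of_nodup _ hnd]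
  have hc0 : d0.contains "unclassified" = cp.contains "unclassified" := by
    rw [PySem.Dict.contains_eq_decide_mem_keys, PySem.Dict.contains_eq_decide_mem_keys, hk0]
  have hnd0 : d0.keys.Nodup := by rw [hk0]; exact hnd
  have hnd1 : d1.keys.Nodup := by rw [hd1]; exact PySem.Dict.nodup_keys_insert _ _ _ hnd0
  have hk1 : d1.keys = cp.keys ++ (if cp.contains "unclassified" then [] else ["unclassified"]) := by
    by_cases h : cp.contains "unclassified" = true
    · rw [hd1, PySem.Dict.keys_insert_of_contains d0 ([] : List String) (by rw [hc0, h]), hk0, h]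
      simp
    · have hf : cp.contains "unclassified" = false := by
        revert h; cases cp.contains "unclassified" <;> simp
      rw [hd1, PySem.Dict.keys_insert_of_not_contains d0 ([] : List String) (by rw [hc0, hf]), hk0, hf]
      simp
  have hgd1 : ∀ k, d1.getD k [] = [] := by
    intro k
    rw [hd1, PySem.Dict.getD_insert]
    split_ifs with h
    · rfl
    · rw [hd0]
      exact pvGetD_foldl_insert_nil cp.keys PySem.Dict.empty (fun j => rfl) k
  have hmem' : ∀ x ∈ tg.map Prod.fst, x ∈ d1.keys := by
    intro x hx
    rcases List.mem_map.mp hx with ⟨p, hp, rfl⟩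
    rw [hk1]
    rcases hmem p hp with h1 | h2
    · by_cases hc : cp.contains "unclassified" = true
      · have hmemk : "unclassified" ∈ cp.keys := by
          have h2 := PySem.Dict.contains_eq_decide_mem_keys cp "unclassified"
          rw [hc] at h2
          exact of_decide_eq_true h2.symm
        rw [h1]
        exact List.mem_append.mpr (Or.inl hmemk)
      · have hf : cp.contains "unclassified" = false := by
          revert hc; cases cp.contains "unclassified" <;> simp
        rw [h1, hf]
        simp
    · exact List.mem_append.mpr (Or.inl h2)
  have hkF : F.keys = d1.keys := by
    have h := PySem.Dict.keys_foldl_modify_key tg Prod.fst ([] : List String)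
      (fun _ p v => v ++ [p.2]) d1
    simp only [] at h
    rw [hF, h, PySem.Set.update_eq_append_filter]
    have hfil : List.filter (fun y => !PySem.Set.contains d1.keys y)
        (PySem.Set.ofList (tg.map Prod.fst)) = [] := by
      apply List.filter_eq_nil_iff.mpr
      intro a ha
      have hmem2 : a ∈ d1.keys := hmem' a (by simpa [PySem.Set.mem_ofList] using ha)
      simp [PySem.Set.contains, hmem2]
    rw [hfil, List.append_nil]
  have hndF : F.keys.Nodup := by rw [hkF]; exact hnd1
  rw [PySem.Dict.items_eq_map_keys F hndF ([] : List String), hkF, hk1]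
  apply List.map_congr_left
  intro k _
  have hg := PySem.Dict.getD_foldl_modify_append tg d1 k
  rw [hF, hg, hgd1 k, List.nil_append, pvFilterMap_eq_filter_map]

-- ===== VERDICT (by name: the statement is the Claim_ definition above) =====
theorem structure_problem_components_impl_spec : Claim_equal_structure_problem_components_impl := by
  intro pt l _
  unfold Spec_structure_problem_components_impl structure_problem_components_impl structure_problem_components_impl_alt
  simp only []
  rw [pvLines_fold (PySem.Dict.ofList l).items (PySem.Str.splitlines pt)]
  refine pvFold_items (PySem.Dict.ofList l) _ (PySem.Dict.nodup_keys_ofList l) ?_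
  intro p hp
  rcases List.mem_filterMap.mp hp with ⟨ln, _, hsome⟩
  by_cases hs : PySem.Str.strip ln = ""
  · rw [if_pos hs] at hsome; cases hsome
  · rw [if_neg hs] at hsome
    cases hsome
    rcases pvClassify_key_mem (PySem.Dict.ofList l).items (PySem.Str.strip ln) with h | h
    · exact Or.inl h
    · refine Or.inr ?_
      simpa [PySem.Dict.keys] using h
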